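-- pv_equiv track=rewrite | github.com/flext-sh/flext-quality | src/flext_quality/plugins/duplication_plugin.py | _get_consolidation_target
-- ===== SOURCE A (Python) =====
-- def _get_consolidation_target(
--
--     project1: str,
--     project2: str,
-- ) -> str:
--     """Determine which project should own consolidated code (SOLID).
--
--     Follows tier hierarchy:
--     - Tier 0: flext-core (foundation)
--     - Tier 1: flext-cli, flext-observability
--     - Tier 2+: Others
--
--     Lower tier (higher level) always wins to consolidate upward.
--     """
--     tier_order = [
--         "flext-core",
--         "flext-cli",
--         "flext-observability",
--     ]
--
--     for tier_project in tier_order: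
--         if project1 == tier_project:
--             return project1
--         if project2 == tier_project:
--             return project2
--
--     # Both are same tier - use alphabetical order for consistency
--     return min(project1, project2)
-- ===== SOURCE B (Python) =====
-- def _get_consolidation_target(
--     project1: str,
--     project2: str,
-- ) -> str:
--     """Pick the owner as the minimum of the pair under a composite (tier, name) key."""
--     tiers = ("flext-core", "flext-cli", "flext-observability")
--
--     def key(p: str) -> tuple[int, str]:
--         return (tiers.index(p) if p in tiers else len(tiers), p)
--
--     return min((project1, project2), key=key)
-- ===== Notes on version B (the rewrite author's own statement) =====
-- stated objective: idiomatic
-- what changed: Replaces A's interleaved early-return scan over the tier list with a branch-free reduction: each project is mapped to a composite key (tier index or len(tiers), name) and the answer is a single min() of the pair under that key, the alphabetical tie-break being folded into the key itself.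
import Mathlib
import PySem

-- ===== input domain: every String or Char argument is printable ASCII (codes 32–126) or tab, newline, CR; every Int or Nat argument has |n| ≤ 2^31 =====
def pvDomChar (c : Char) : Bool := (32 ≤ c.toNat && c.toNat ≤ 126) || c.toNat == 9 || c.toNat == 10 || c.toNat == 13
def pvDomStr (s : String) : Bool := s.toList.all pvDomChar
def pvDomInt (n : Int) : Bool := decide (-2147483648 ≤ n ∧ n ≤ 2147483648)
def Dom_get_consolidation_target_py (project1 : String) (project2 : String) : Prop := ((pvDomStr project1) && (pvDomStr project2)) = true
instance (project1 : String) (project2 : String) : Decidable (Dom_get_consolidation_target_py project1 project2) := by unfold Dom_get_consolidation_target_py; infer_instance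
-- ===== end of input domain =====

-- B replaces A's interleaved early-return tier scan by a branch-free min() of the pair under a composite (tier-index, name) key (idiomatic rewrite, same cost).


-- ===== PORT A =====
-- the for-loop over tier_order: check project1 then project2 against each tier, else continue
def pvTierLoop (project1 : String) (project2 : String) : List String → String
  | [] => if project1 ≤ project2 then project1 else project2   -- min(project1, project2)
  | t :: ts =>
    if project1 == t then project1
    else if project2 == t then project2
    else pvTierLoop project1 project2 ts

def get_consolidation_target_py (project1 : String) (project2 : String) : String :=
  pvTierLoop project1 project2 ["flext-core", "flext-cli", "flext-observability"]

-- ===== PORT B =====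
def pvTiers : List String := ["flext-core", "flext-cli", "flext-observability"]

-- tiers.index(p) if p in tiers else len(tiers)
def pvRankKey (p : String) : Int :=
  match PySem.List.index? pvTiers p with
  | some i => (i : Int)
  | none => (pvTiers.length : Int)

-- min((project1, project2), key=key) with the tuple key (pvRankKey p, p)
def get_consolidation_target_py_alt (project1 : String) (project2 : String) : String :=
  match PySem.List.min2? [project1, project2] pvRankKey (fun p => p) with
  | some m => m
  | none => project1   -- unreachable: the pair is nonempty

-- ===== PRECONDITION & SPEC =====
def Spec_get_consolidation_target_py (project1 : String) (project2 : String) (out : String) : Prop := out = get_consolidation_target_py_alt project1 project2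
instance (project1 : String) (project2 : String) (out : String) : Decidable (Spec_get_consolidation_target_py project1 project2 out) := by unfold Spec_get_consolidation_target_py; infer_instance

-- ===== CLAIM (what is proved, stated in full; the proofs are below) =====
def Claim_equal_get_consolidation_target_py : Prop := ∀ (project1 : String) (project2 : String), Dom_get_consolidation_target_py project1 project2 → Spec_get_consolidation_target_py project1 project2 (get_consolidation_target_py project1 project2)

-- ===== LEMMAS AND PROOFS =====
theorem pvRankKey_eval (p : String) :
    pvRankKey p =
      (if p = "flext-core" then 0
       else if p = "flext-cli" then 1
       else if p = "flext-observability" then 2 else 3) := by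
  split_ifs with h1 h2 h3
  · subst h1; rfl
  · subst h2; rfl
  · subst h3; rfl
  · simp [pvRankKey, pvTiers, PySem.List.index?, List.idxOf?, List.findIdx?, List.findIdx?.go,
      beq_eq_false_iff_ne.mpr (Ne.symm h1), beq_eq_false_iff_ne.mpr (Ne.symm h2),
      beq_eq_false_iff_ne.mpr (Ne.symm h3)]

theorem min2?_pair {α κ : Type} [LinearOrder κ] [LinearOrder α] (a b : α) (k : α → κ) :
    PySem.List.min2? [a, b] k (fun x => x) =
      some (if k b < k a ∨ (¬ k a < k b ∧ b < a) then b else a) := by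
  simp [PySem.List.min2?, List.foldl]
  split_ifs <;> simp_all

-- ===== VERDICT (by name: the statement is the Claim_ definition above) =====
theorem get_consolidation_target_py_spec : Claim_equal_get_consolidation_target_py := by
  intro p1 p2 _
  unfold Spec_get_consolidation_target_py get_consolidation_target_py get_consolidation_target_py_alt
  rw [min2?_pair p1 p2 pvRankKey, pvRankKey_eval p1, pvRankKey_eval p2]
  by_cases h1 : p1 = "flext-core" <;>
  by_cases h2 : p2 = "flext-core" <;>
  by_cases h3 : p1 = "flext-cli" <;>
  by_cases h4 : p2 = "flext-cli" <;>
  by_cases h5 : p1 = "flext-observability" <;>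
  by_cases h6 : p2 = "flext-observability" <;>
    simp_all [pvTierLoop, le_iff_lt_or_eq] <;>
    (first
      | rfl
      | (rcases lt_trichotomy p1.toList p2.toList with h'|h'|h'
         · simp [h', asymm h']
         · simp [String.ext h']
         · simp [h', asymm h']))
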